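-- pv_equiv track=rewrite | github.com/TCStreamGit/TCSGO | services/seed-prices.py | load_wear_list_from_prices
-- ===== SOURCE A (Python) =====
-- from typing import Any, Dict, Iterable, List, Set, Tuple
--
-- DEFAULT_WEAR_ORDER = [
--     "Factory New",
--     "Minimal Wear",
--     "Field-Tested",
--     "Well-Worn",
--     "Battle-Scarred",
-- ]
--
-- def load_wear_list_from_prices(prices: Dict[str, Any]) -> List[str]:
--     wm = prices.get("wearMultipliers")
--     if isinstance(wm, dict):
--         wears = [str(k) for k in wm.keys() if isinstance(k, str)]
--         if wears:
--             # Preserve A Human-Friendly Order If Possible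
--             ordered: List[str] = []
--             for w in DEFAULT_WEAR_ORDER:
--                 if w in wears:
--                     ordered.append(w)
--             for w in wears:
--                 if w not in ordered:
--                     ordered.append(w)
--             return ordered
--     return list(DEFAULT_WEAR_ORDER)
-- ===== SOURCE B (Python) =====
-- from typing import Any, Dict, List
--
-- DEFAULT_WEAR_ORDER = [
--     "Factory New",
--     "Minimal Wear",
--     "Field-Tested",
--     "Well-Worn",
--     "Battle-Scarred",
-- ]
--
-- def load_wear_list_from_prices(prices: Dict[str, Any]) -> List[str]:
--     wm = prices.get("wearMultipliers")
--     if isinstance(wm, dict):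
--         wears = [str(k) for k in wm.keys() if isinstance(k, str)]
--         if wears:
--             # single pass: bucket priority names into fixed slots, collect the rest
--             prio = {name: i for i, name in enumerate(DEFAULT_WEAR_ORDER)}
--             slots: List[Any] = [None] * len(DEFAULT_WEAR_ORDER)
--             extras: List[str] = []
--             for w in wears:
--                 i = prio.get(w)
--                 if i is None:
--                     extras.append(w)
--                 else:
--                     slots[i] = w
--             return [s for s in slots if s is not None] + extras
--     return list(DEFAULT_WEAR_ORDER)
-- ===== Notes on version B (the rewrite author's own statement) =====
-- stated objective: alternative
-- what changed: Replaces A's two ordering loops (a scan of the priority list with membership tests plus a 'not in ordered' dedup loop) by a single pass over the wear names that buckets priority names into a fixed slot table and appends the rest, then concatenates the compacted slots with the extras.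
import Mathlib
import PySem

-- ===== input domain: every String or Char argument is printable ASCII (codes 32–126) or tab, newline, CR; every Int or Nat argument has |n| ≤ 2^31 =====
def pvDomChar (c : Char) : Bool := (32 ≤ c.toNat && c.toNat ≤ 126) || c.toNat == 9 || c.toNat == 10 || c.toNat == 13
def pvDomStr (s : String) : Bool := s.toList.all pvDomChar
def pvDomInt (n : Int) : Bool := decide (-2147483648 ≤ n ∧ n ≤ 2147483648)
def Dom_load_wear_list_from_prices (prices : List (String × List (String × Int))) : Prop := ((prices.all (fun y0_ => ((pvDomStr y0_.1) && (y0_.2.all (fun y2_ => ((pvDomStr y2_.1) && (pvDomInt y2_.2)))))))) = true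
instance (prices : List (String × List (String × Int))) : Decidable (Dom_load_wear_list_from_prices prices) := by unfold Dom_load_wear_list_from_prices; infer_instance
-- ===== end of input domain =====

-- B replaces A's two ordering loops by a single bucket-table pass over the wear names (objective: alternative).

-- ===== PORT A =====
def DEFAULT_WEAR_ORDER : List String :=
  ["Factory New", "Minimal Wear", "Field-Tested", "Well-Worn", "Battle-Scarred"]

def load_wear_list_from_prices (prices : List (String × List (String × Int))) : List String :=
  match prices.find? (fun p => p.1 == "wearMultipliers") with
  | some (_, wm) =>
      -- wm is a dict with str keys, so 'wears' = its distinct keys in insertion order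
      let wears : List String := PySem.Set.ofList (wm.map (·.1))
      if wears ≠ [] then
        let ordered : List String :=
          DEFAULT_WEAR_ORDER.foldl (fun acc w => if wears.contains w then acc ++ [w] else acc) []
        wears.foldl (fun acc w => if !(acc.contains w) then acc ++ [w] else acc) ordered
      else DEFAULT_WEAR_ORDER
  | none => DEFAULT_WEAR_ORDER

-- ===== PORT B =====
-- prio = {name: i for i, name in enumerate(DEFAULT_WEAR_ORDER)}
def pvPrio : PySem.Dict String Int :=
  (PySem.List.enumerate DEFAULT_WEAR_ORDER 0).foldl (fun d p => d.insert p.2 p.1) PySem.Dict.empty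

def load_wear_list_from_prices_alt (prices : List (String × List (String × Int))) : List String :=
  match prices.find? (fun p => p.1 == "wearMultipliers") with
  | some (_, wm) =>
      let wears : List String := PySem.Set.ofList (wm.map (·.1))
      if wears ≠ [] then
        let st := wears.foldl (fun st w =>
            match pvPrio.get? w with
            | none => (st.1, st.2 ++ [w])
            -- slots[i] = w: i is a value of pvPrio, so 0 ≤ i < 5 = len(slots); in range, .set i.toNat is exact
            | some i => (st.1.set i.toNat w, st.2))
          (List.replicate DEFAULT_WEAR_ORDER.length (none : Option String), ([] : List String))
        st.1.filterMap id ++ st.2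
      else DEFAULT_WEAR_ORDER
  | none => DEFAULT_WEAR_ORDER

-- ===== PRECONDITION & SPEC =====
def Spec_load_wear_list_from_prices (prices : List (String × List (String × Int))) (out : List String) : Prop := out = load_wear_list_from_prices_alt prices
instance (prices : List (String × List (String × Int))) (out : List String) : Decidable (Spec_load_wear_list_from_prices prices out) := by unfold Spec_load_wear_list_from_prices; infer_instance

-- ===== CLAIM (what is proved, stated in full; the proofs are below) =====
def Claim_equal_load_wear_list_from_prices : Prop := ∀ (prices : List (String × List (String × Int))), Dom_load_wear_list_from_prices prices → Spec_load_wear_list_from_prices prices (load_wear_list_from_prices prices)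

-- ===== LEMMAS AND PROOFS =====

-- one slot of B's bucket table, as a function of the already-processed prefix
def pvSlot (n : String) (s : List String) : Option String := if s.contains n then some n else none
def pvSlots (s : List String) : List (Option String) :=
  [pvSlot "Factory New" s, pvSlot "Minimal Wear" s, pvSlot "Field-Tested" s,
   pvSlot "Well-Worn" s, pvSlot "Battle-Scarred" s]

theorem get?_pvPrio (w : String) :
    pvPrio.get? w =
      if w == "Factory New" then some 0 else if w == "Minimal Wear" then some 1
      else if w == "Field-Tested" then some 2 else if w == "Well-Worn" then some 3
      else if w == "Battle-Scarred" then some 4 else none := by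
  have h : pvPrio = PySem.Dict.mk [("Factory New",0),("Minimal Wear",1),("Field-Tested",2),("Well-Worn",3),("Battle-Scarred",4)] := by decide
  rw [h]
  simp only [PySem.Dict.get?, List.find?, beq_iff_eq]
  cases hb1 : ("Factory New" == w) <;> cases hb2 : ("Minimal Wear" == w) <;>
    cases hb3 : ("Field-Tested" == w) <;> cases hb4 : ("Well-Worn" == w) <;>
    cases hb5 : ("Battle-Scarred" == w) <;> simp_all [beq_iff_eq] <;>
    (try (split_ifs <;> simp_all)) <;> (try simp_all [ne_comm])

-- B's fold: after processing `pre` the state is (bucket table of pre, non-priority names of pre)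
theorem bloop (l : List String) : ∀ pre : List String,
    l.foldl (fun st w =>
        match pvPrio.get? w with
        | none => (st.1, st.2 ++ [w])
        | some i => (st.1.set i.toNat w, st.2))
      (pvSlots pre, pre.filter (fun w => !(DEFAULT_WEAR_ORDER.contains w)))
    = (pvSlots (pre ++ l), (pre ++ l).filter (fun w => !(DEFAULT_WEAR_ORDER.contains w))) := by
  induction l with
  | nil => intro pre; simp
  | cons w t ih =>
    intro pre
    rw [List.foldl_cons]
    have hstep :
        (match pvPrio.get? w with
        | none => ((pvSlots pre, pre.filter (fun w => !(DEFAULT_WEAR_ORDER.contains w))).1,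
                   (pvSlots pre, pre.filter (fun w => !(DEFAULT_WEAR_ORDER.contains w))).2 ++ [w])
        | some i => ((pvSlots pre, pre.filter (fun w => !(DEFAULT_WEAR_ORDER.contains w))).1.set i.toNat w,
                     (pvSlots pre, pre.filter (fun w => !(DEFAULT_WEAR_ORDER.contains w))).2))
        = (pvSlots (pre ++ [w]), (pre ++ [w]).filter (fun w => !(DEFAULT_WEAR_ORDER.contains w))) := by
      rw [get?_pvPrio]
      by_cases h1 : w = "Factory New"
      · subst h1
        simp [pvSlots, pvSlot, List.filter_append, DEFAULT_WEAR_ORDER]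
      by_cases h2 : w = "Minimal Wear"
      · subst h2
        simp [h1, pvSlots, pvSlot, List.filter_append, DEFAULT_WEAR_ORDER]
      by_cases h3 : w = "Field-Tested"
      · subst h3
        simp [h1, h2, pvSlots, pvSlot, List.filter_append, DEFAULT_WEAR_ORDER]
      by_cases h4 : w = "Well-Worn"
      · subst h4
        simp [h1, h2, h3, pvSlots, pvSlot, List.filter_append, DEFAULT_WEAR_ORDER]
      by_cases h5 : w = "Battle-Scarred"
      · subst h5
        simp [h1, h2, h3, h4, pvSlots, pvSlot, List.filter_append, DEFAULT_WEAR_ORDER]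
      · simp [h1, h2, h3, h4, h5, pvSlots, pvSlot, List.filter_append, DEFAULT_WEAR_ORDER,
          Ne.symm h1, Ne.symm h2, Ne.symm h3, Ne.symm h4, Ne.symm h5]
    rw [hstep, ih (pre ++ [w])]
    simp

-- compacting the bucket table yields the present priority names in priority order
theorem slots_compact (ws : List String) :
    (pvSlots ws).filterMap id = DEFAULT_WEAR_ORDER.filter (fun w => ws.contains w) := by
  by_cases c1 : "Factory New" ∈ ws <;> by_cases c2 : "Minimal Wear" ∈ ws <;>
    by_cases c3 : "Field-Tested" ∈ ws <;> by_cases c4 : "Well-Worn" ∈ ws <;>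
    by_cases c5 : "Battle-Scarred" ∈ ws <;>
      simp [pvSlots, pvSlot, DEFAULT_WEAR_ORDER, c1, c2, c3, c4, c5]

-- A's second loop on a duplicate-free `ws` appends exactly the non-priority names in order
theorem aloop (ws : List String) (hnd : ws.Nodup) : ∀ (l pre : List String), ws = pre ++ l →
    l.foldl (fun acc w => if !(acc.contains w) then acc ++ [w] else acc)
      (DEFAULT_WEAR_ORDER.filter (fun w => ws.contains w)
        ++ pre.filter (fun w => !(DEFAULT_WEAR_ORDER.contains w)))
    = DEFAULT_WEAR_ORDER.filter (fun w => ws.contains w)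
        ++ ws.filter (fun w => !(DEFAULT_WEAR_ORDER.contains w)) := by
  intro l
  induction l with
  | nil => intro pre h; subst h; simp
  | cons w t ih =>
    intro pre h
    have hnd' : (pre ++ w :: t).Nodup := h ▸ hnd
    have hw : w ∉ pre := fun hm => (List.disjoint_of_nodup_append hnd') hm (by simp)
    have hwws : w ∈ ws := by subst h; simp
    rw [List.foldl_cons]
    by_cases hD : w ∈ DEFAULT_WEAR_ORDER
    · rw [if_neg (by simp [List.mem_filter, hD, hwws])]
      have := ih (pre ++ [w]) (by simp [h])
      rw [List.filter_append] at this
      simpa [hD] using this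
    · rw [if_pos (by simp [List.mem_filter, hD, hw])]
      have := ih (pre ++ [w]) (by simp [h])
      rw [List.filter_append] at this
      simpa [hD, List.append_assoc] using this

-- both cores compute (present priority names in priority order) ++ (the rest in key order)
theorem core_eq (ws : List String) (hnd : ws.Nodup) :
    ws.foldl (fun acc w => if !(acc.contains w) then acc ++ [w] else acc)
      (DEFAULT_WEAR_ORDER.foldl (fun acc w => if ws.contains w then acc ++ [w] else acc) [])
    = (pvSlots ws).filterMap id ++ ws.filter (fun w => !(DEFAULT_WEAR_ORDER.contains w)) := by
  have h1 : DEFAULT_WEAR_ORDER.foldl (fun acc w => if ws.contains w then acc ++ [w] else acc) []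
      = DEFAULT_WEAR_ORDER.filter (fun w => ws.contains w) := by
    have := PySem.List.foldl_append_if (fun w => ws.contains w) id DEFAULT_WEAR_ORDER []
    simpa using this
  rw [h1, slots_compact]
  have := aloop ws hnd ws [] (by simp)
  simpa using this

-- ===== VERDICT (by name: the statement is the Claim_ definition above) =====
theorem load_wear_list_from_prices_spec : Claim_equal_load_wear_list_from_prices := by
  intro prices _
  unfold Spec_load_wear_list_from_prices load_wear_list_from_prices load_wear_list_from_prices_alt
  cases hf : prices.find? (fun p => p.1 == "wearMultipliers") with
  | none => rfl
  | some p =>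
    obtain ⟨k, wm⟩ := p
    simp only
    set ws : List String := PySem.Set.ofList (wm.map (·.1)) with hws
    by_cases h : ws ≠ []
    · simp only [if_pos h]
      have hnd : ws.Nodup := PySem.Set.nodup_ofList _
      rw [core_eq ws hnd]
      have hb := bloop ws []
      have h0 : pvSlots [] = List.replicate DEFAULT_WEAR_ORDER.length (none : Option String) := by decide
      rw [h0] at hb
      simp only [List.filter_nil, List.nil_append] at hb
      rw [hb]
    · simp [h]
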